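-- pv_equiv track=rewrite | github.com/tleub-ebp/WorkPilot-AI | apps/backend/i18n_agent/i18n_scanner.py | _is_likely_code
-- ===== SOURCE A (Python) =====
-- def _is_likely_code(text: str) -> bool:
--     """Heuristic: is this string likely code rather than user-facing text?"""
--     code_indicators = [
--         "()",
--         "=>",
--         "->",
--         "==",
--         "!=",
--         "{}",
--         "[]",
--         "//",
--         "/*",
--         "import ",
--         "from ",
--     ]
--     return any(ind in text for ind in code_indicators)
-- ===== SOURCE B (Python) =====
-- def _is_likely_code(text: str) -> bool:
--     """Heuristic: is this string likely code rather than user-facing text?"""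
--     code_indicators = [
--         "()",
--         "=>",
--         "->",
--         "==",
--         "!=",
--         "{}",
--         "[]",
--         "//",
--         "/*",
--         "import ",
--         "from ",
--     ]
--     # one left-to-right scan: at each position, does some indicator start here?
--     for i in range(len(text)):
--         for ind in code_indicators:
--             if text.startswith(ind, i):
--                 return True
--     return False
-- ===== Notes on version B (the rewrite author's own statement) =====
-- stated objective: alternative
-- what changed: Replaced the per-indicator substring searches (one full scan of text per indicator) with a single left-to-right scan over positions, checking at each position whether any indicator starts there.
import Mathlib
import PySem

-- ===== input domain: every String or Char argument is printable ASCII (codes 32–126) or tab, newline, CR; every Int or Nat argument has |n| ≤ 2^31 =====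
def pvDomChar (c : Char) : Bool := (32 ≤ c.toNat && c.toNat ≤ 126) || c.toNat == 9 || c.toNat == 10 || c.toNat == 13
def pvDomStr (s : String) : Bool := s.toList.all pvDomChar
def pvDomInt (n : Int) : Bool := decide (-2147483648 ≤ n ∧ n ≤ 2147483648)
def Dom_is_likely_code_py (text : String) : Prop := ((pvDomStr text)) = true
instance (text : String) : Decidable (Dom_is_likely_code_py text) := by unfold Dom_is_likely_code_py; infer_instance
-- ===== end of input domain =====

-- B replaces A's per-indicator substring searches with one left-to-right scan of the text,
-- checking at each position whether any indicator starts there (objective: alternative).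

-- ===== PORT A =====
def pvCodeIndicators : List String :=
  ["()", "=>", "->", "==", "!=", "{}", "[]", "//", "/*", "import ", "from "]

def is_likely_code_py (text : String) : Bool :=
  pvCodeIndicators.any (fun ind => PySem.Str.isIn ind text)

-- ===== PORT B =====
-- Source B's loop 'for i in range(len(text))' transcribed as structural recursion on the
-- successive suffixes of the text; text.startswith(ind, i) is Chars.startswith on the suffix.
def pvAltScan (inds : List (List Char)) : List Char → Bool
  | [] => false
  | c :: rest =>
      if inds.any (fun ind => PySem.Chars.startswith (c :: rest) ind) then true
      else pvAltScan inds rest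

def is_likely_code_py_alt (text : String) : Bool :=
  pvAltScan (pvCodeIndicators.map String.toList) text.toList

-- ===== PRECONDITION & SPEC =====
def Spec_is_likely_code_py (text : String) (out : Bool) : Prop := out = is_likely_code_py_alt text
instance (text : String) (out : Bool) : Decidable (Spec_is_likely_code_py text out) := by unfold Spec_is_likely_code_py; infer_instance

-- ===== CLAIM (what is proved, stated in full; the proofs are below) =====
def Claim_equal_is_likely_code_py : Prop := ∀ (text : String), Dom_is_likely_code_py text → Spec_is_likely_code_py text (is_likely_code_py text)

-- ===== LEMMAS AND PROOFS =====

-- B's scan finds exactly the indicators occurring as an infix (all indicators are nonempty).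
theorem pvAltScan_iff (inds : List (List Char)) (h : ∀ ind ∈ inds, ind ≠ [])
    (cs : List Char) :
    pvAltScan inds cs = true ↔ ∃ ind ∈ inds, ind <:+: cs := by
  induction cs with
  | nil =>
      simp only [pvAltScan]
      constructor
      · intro hc; exact absurd hc (by simp)
      · rintro ⟨ind, hmem, hinf⟩
        exact absurd (List.eq_nil_of_infix_nil hinf) (h ind hmem)
  | cons c rest ih =>
      simp only [pvAltScan]
      split_ifs with hany
      · simp only [List.any_eq_true] at hany
        obtain ⟨ind, hmem, hpre⟩ := hany
        rw [PySem.Chars.startswith_iff] at hpre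
        exact iff_of_true rfl ⟨ind, hmem, hpre.isInfix⟩
      · rw [ih]
        constructor
        · rintro ⟨ind, hmem, hinf⟩; exact ⟨ind, hmem, hinf.trans (List.suffix_cons c rest).isInfix⟩
        · rintro ⟨ind, hmem, hinf⟩
          rcases List.infix_cons_iff.mp hinf with hpre | hinf'
          · exact absurd (List.any_eq_true.mpr ⟨ind, hmem, (PySem.Chars.startswith_iff _ _).mpr hpre⟩) hany
          · exact ⟨ind, hmem, hinf'⟩

-- ===== VERDICT (by name: the statement is the Claim_ definition above) =====
theorem is_likely_code_py_spec : Claim_equal_is_likely_code_py := by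
  intro text _
  unfold Spec_is_likely_code_py is_likely_code_py is_likely_code_py_alt
  rw [Bool.eq_iff_iff]
  rw [pvAltScan_iff _ (by decide)]
  simp only [List.any_eq_true, PySem.Str.isIn_iff_infix, List.mem_map]
  constructor
  · rintro ⟨ind, hmem, hinf⟩; exact ⟨ind.toList, ⟨ind, hmem, rfl⟩, hinf⟩
  · rintro ⟨l, ⟨ind, hmem, rfl⟩, hinf⟩; exact ⟨ind, hmem, hinf⟩
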